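-- pv_equiv track=rewrite | github.com/minyoungcho99/Programming-Basics | Python/created_problems.py | maxPrefCounter
-- ===== SOURCE A (Python) =====
-- def maxPrefCounter(pref):
--     aCounter = 0
--     bCounter = 0
--     cCounter = 0
--     for char in pref:
--         if char == "A":
--             aCounter += 1
--         elif char == "B":
--             bCounter += 1
--         else:
--             cCounter += 1
--     if aCounter > bCounter and aCounter > cCounter:
--         return "A"
--     elif bCounter > aCounter and bCounter > cCounter:
--         return "B"
--     elif cCounter > aCounter and cCounter > bCounter:
--         return "C"
--     else:
--         return "Tie!"
-- ===== SOURCE B (Python) =====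
-- def maxPrefCounter(pref):
--     # sort-then-scan: bucket every char into its category letter, sort, cut the
--     # sorted list into runs, then one scan over the runs for a unique longest run
--     cats = sorted(ch if ch in "AB" else "C" for ch in pref)
--     runs = []
--     i = 0
--     n = len(cats)
--     while i < n:
--         j = i
--         while j < n and cats[j] == cats[i]:
--             j += 1
--         runs.append((j - i, cats[i]))
--         i = j
--     best = None
--     tie = False
--     for run in runs:
--         if best is None or run[0] > best[0]:
--             best, tie = run, False
--         elif run[0] == best[0]:
--             tie = True
--     return "Tie!" if best is None or tie else best[1]
-- ===== Notes on version B (the rewrite author's own statement) =====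
-- stated objective: alternative
-- what changed: Replaces A's single counting loop with three counters and a comparison cascade by a sort-then-scan algorithm: map each char to its category letter, sort, cut the sorted list into runs, and scan the runs once for a strictly-longest run (else the tie marker).
import Mathlib
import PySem

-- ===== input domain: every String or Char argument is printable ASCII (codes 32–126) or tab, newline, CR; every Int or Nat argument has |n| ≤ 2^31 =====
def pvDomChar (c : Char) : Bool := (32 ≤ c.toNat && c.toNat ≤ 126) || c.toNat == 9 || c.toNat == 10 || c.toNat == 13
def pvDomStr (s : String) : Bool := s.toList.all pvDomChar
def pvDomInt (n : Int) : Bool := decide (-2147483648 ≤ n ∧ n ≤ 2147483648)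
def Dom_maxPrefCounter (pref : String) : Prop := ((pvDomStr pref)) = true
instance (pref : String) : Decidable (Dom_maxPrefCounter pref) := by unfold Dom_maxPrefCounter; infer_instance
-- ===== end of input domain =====

-- B replaces A's counting loop + comparison cascade by sort-then-scan: bucket chars into
-- category letters, sort, cut into runs, one scan of the runs for a strictly-longest run.

-- ===== PORT A =====
-- the body of A's for-loop over the characters of pref
def pvStep (t : Int × Int × Int) (ch : Char) : Int × Int × Int :=
  if ch == 'A' then (t.1 + 1, t.2.1, t.2.2)
  else if ch == 'B' then (t.1, t.2.1 + 1, t.2.2)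
  else (t.1, t.2.1, t.2.2 + 1)

def maxPrefCounter (pref : String) : String :=
  let t := pref.toList.foldl pvStep ((0 : Int), (0 : Int), (0 : Int))
  if t.1 > t.2.1 ∧ t.1 > t.2.2 then "A"
  else if t.2.1 > t.1 ∧ t.2.1 > t.2.2 then "B"
  else if t.2.2 > t.1 ∧ t.2.2 > t.2.1 then "C"
  else "Tie!"

-- ===== PORT B =====
-- B's two nested while loops cutting the sorted list into (length, letter) runs:
-- the inner 'while cats[j] == cats[i]' is the takeWhile/dropWhile of the run's letter
def pvRuns : List Char → List (Int × Char)
  | [] => []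
  | x :: xs =>
      (((xs.takeWhile (fun y => y == x)).length : Int) + 1, x) ::
        pvRuns (xs.dropWhile (fun y => y == x))
  termination_by l => l.length
  decreasing_by
    have := List.length_dropWhile_le (p := fun y => y == x) (l := xs)
    simp; omega

-- the body of B's 'for run in runs' scan (state: best run so far, tie flag)
def pvScanStep (s : Option (Int × Char) × Bool) (run : Int × Char) : Option (Int × Char) × Bool :=
  match s.1 with
  | none => (some run, false)
  | some b =>
      if run.1 > b.1 then (some run, false)
      else if run.1 = b.1 then (s.1, true)
      else s

def maxPrefCounter_alt (pref : String) : String :=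
  let cats := PySem.List.sorted
    (pref.toList.map (fun ch => if ch == 'A' || ch == 'B' then ch else 'C'))
    (fun x => x) false
  let runs := pvRuns cats
  let r := runs.foldl pvScanStep (none, false)
  match r.1, r.2 with
  | none, _ => "Tie!"
  | some _, true => "Tie!"
  | some b, false => String.ofList [b.2]

-- ===== PRECONDITION & SPEC =====
def Spec_maxPrefCounter (pref : String) (out : String) : Prop := out = maxPrefCounter_alt pref
instance (pref : String) (out : String) : Decidable (Spec_maxPrefCounter pref out) := by unfold Spec_maxPrefCounter; infer_instance

-- ===== CLAIM (what is proved, stated in full; the proofs are below) =====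
def Claim_equal_maxPrefCounter : Prop := ∀ (pref : String), Dom_maxPrefCounter pref → Spec_maxPrefCounter pref (maxPrefCounter pref)

-- ===== LEMMAS AND PROOFS =====

-- the fold of A's loop body computes the three tallies
theorem pv_foldl_pvStep (l : List Char) (a b c : Int) :
    l.foldl pvStep (a, b, c) =
      (a + l.count 'A', b + l.count 'B',
       c + ((l.length : Int) - l.count 'A' - l.count 'B')) := by
  induction l generalizing a b c with
  | nil => simp
  | cons hd tl ih =>
      have hA : (tl.count 'A' : Int) ≤ tl.length := by exact_mod_cast List.count_le_length
      have hB : (tl.count 'B' : Int) ≤ tl.length := by exact_mod_cast List.count_le_length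
      by_cases h1 : hd = 'A'
      · subst h1
        simp [pvStep, ih, Prod.ext_iff]
        omega
      · by_cases h2 : hd = 'B'
        · subst h2
          simp [pvStep, h1, ih, Prod.ext_iff]
          omega
        · simp [pvStep, h1, h2, ih, Prod.ext_iff]
          omega

-- the canonical sorted category list
def pvCanon (na nb nc : Nat) : List Char :=
  List.replicate na 'A' ++ List.replicate nb 'B' ++ List.replicate nc 'C'

theorem pv_sorted_canon (m : List Char)
    (hm : ∀ x ∈ m, x = 'A' ∨ x = 'B' ∨ x = 'C') :
    PySem.List.sorted m (fun x => x) false =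
      pvCanon (m.count 'A') (m.count 'B') (m.count 'C') := by
  apply PySem.List.sorted_id_eq_of_perm_of_pairwise
  · rw [List.perm_iff_count]
    intro x
    by_cases hA : x = 'A' <;> by_cases hB : x = 'B' <;> by_cases hC : x = 'C' <;>
      simp_all [pvCanon, List.count_append, List.count_replicate,
        Ne.symm (a := x)]
    · rw [eq_comm, List.count_eq_zero]
      intro hx
      rcases hm x hx with h | h | h <;> simp_all
  · simp only [pvCanon]
    rw [List.pairwise_append]
    refine ⟨?_, ?_, ?_⟩
    · rw [List.pairwise_append]
      refine ⟨List.pairwise_replicate.mpr (by simp), List.pairwise_replicate.mpr (by simp), ?_⟩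
      intro a ha b hb
      simp_all [List.eq_of_mem_replicate ha, List.eq_of_mem_replicate hb]
    · exact List.pairwise_replicate.mpr (by simp)
    · intro a ha b hb
      rw [List.mem_append] at ha
      rcases ha with ha | ha <;>
        simp_all [List.eq_of_mem_replicate ha, List.eq_of_mem_replicate hb]

theorem pv_takeWhile_rep (k : Nat) (x : Char) (rest : List Char)
    (h : ∀ y ∈ rest, (y == x) = false) :
    (List.replicate k x ++ rest).takeWhile (fun y => y == x) = List.replicate k x ∧
    (List.replicate k x ++ rest).dropWhile (fun y => y == x) = rest := by
  induction k with
  | zero =>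
      cases rest with
      | nil => simp
      | cons r t =>
          have := h r (by simp)
          simp [this]
  | succ n ih => simpa [List.replicate_succ] using ih

theorem pv_runs_rep (k : Nat) (x : Char) (rest : List Char) (hk : 0 < k)
    (h : ∀ y ∈ rest, (y == x) = false) :
    pvRuns (List.replicate k x ++ rest) = ((k : Int), x) :: pvRuns rest := by
  obtain ⟨n, rfl⟩ : ∃ n, k = n + 1 := ⟨k - 1, by omega⟩
  rw [List.replicate_succ, List.cons_append, pvRuns]
  have := pv_takeWhile_rep n x rest h
  simp [this.1, this.2]

-- the run list of the canonical sorted list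
def pvRunsOf (na nb nc : Nat) : List (Int × Char) :=
  (if 0 < na then [((na : Int), 'A')] else []) ++
  (if 0 < nb then [((nb : Int), 'B')] else []) ++
  (if 0 < nc then [((nc : Int), 'C')] else [])

theorem pv_runs_canon (na nb nc : Nat) :
    pvRuns (pvCanon na nb nc) = pvRunsOf na nb nc := by
  unfold pvCanon pvRunsOf
  have hC : ∀ (n : Nat), pvRuns (List.replicate n 'C') =
      if 0 < n then [((n : Int), 'C')] else [] := by
    intro n
    by_cases hn : 0 < n
    · rw [show List.replicate n 'C' = List.replicate n 'C' ++ [] by simp,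
        pv_runs_rep n 'C' [] hn (by simp)]
      simp [hn, pvRuns]
    · simp [show n = 0 by omega, pvRuns]
  have hBC : ∀ (nb nc : Nat), pvRuns (List.replicate nb 'B' ++ List.replicate nc 'C') =
      (if 0 < nb then [((nb : Int), 'B')] else []) ++
      (if 0 < nc then [((nc : Int), 'C')] else []) := by
    intro nb nc
    by_cases hb : 0 < nb
    · rw [pv_runs_rep nb 'B' _ hb (by intro y hy; simp [List.eq_of_mem_replicate hy])]
      simp [hb, hC]
    · simp [show nb = 0 by omega, hC]
  by_cases ha : 0 < na
  · rw [List.append_assoc] at *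
    rw [pv_runs_rep na 'A' _ ha (by
      intro y hy
      rw [List.mem_append] at hy
      rcases hy with hy | hy <;> simp [List.eq_of_mem_replicate hy])]
    simp [ha, hBC]
  · simp [show na = 0 by omega, hBC]

-- the three category counts exhaust a list over {A,B,C}
theorem pv_count_sum (m : List Char) (hm : ∀ x ∈ m, x = 'A' ∨ x = 'B' ∨ x = 'C') :
    m.count 'A' + m.count 'B' + m.count 'C' = m.length := by
  induction m with
  | nil => simp
  | cons hd tl ih =>
      have ht : ∀ x ∈ tl, x = 'A' ∨ x = 'B' ∨ x = 'C' := fun x hx => hm x (by simp [hx])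
      have hih := ih ht
      rcases hm hd (by simp) with h | h | h <;> subst h <;>
        simp <;> omega

-- B's run scan on the canonical runs agrees with A's comparison cascade
theorem pv_decision (na nb nc : Nat) :
    (if (na : Int) > nb ∧ (na : Int) > nc then "A"
     else if (nb : Int) > na ∧ (nb : Int) > nc then "B"
     else if (nc : Int) > na ∧ (nc : Int) > nb then "C"
     else "Tie!") =
    (match ((pvRunsOf na nb nc).foldl pvScanStep (none, false)).1,
           ((pvRunsOf na nb nc).foldl pvScanStep (none, false)).2 with
     | none, _ => "Tie!"
     | some _, true => "Tie!"
     | some b, false => String.ofList [b.2]) := by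
  unfold pvRunsOf
  by_cases ha : 0 < na <;> by_cases hb : 0 < nb <;> by_cases hc : 0 < nc <;>
    simp only [ha, hb, hc, if_true, if_false, List.nil_append, List.append_nil,
      List.cons_append, List.foldl_cons, List.foldl_nil] <;>
    (try simp only [pvScanStep]) <;>
    split_ifs <;> (try simp only [pvScanStep]) <;> (try split_ifs) <;>
    first
      | rfl
      | omega
      | simp_all

-- ===== VERDICT (by name: the statement is the Claim_ definition above) =====
theorem maxPrefCounter_spec : Claim_equal_maxPrefCounter := by
  intro pref _
  unfold Spec_maxPrefCounter maxPrefCounter maxPrefCounter_alt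
  set l := pref.toList with hl
  set m := l.map (fun ch => if ch == 'A' || ch == 'B' then ch else 'C') with hmdef
  have hmem : ∀ x ∈ m, x = 'A' ∨ x = 'B' ∨ x = 'C' := by
    intro x hx
    rw [hmdef, List.mem_map] at hx
    obtain ⟨ch, _, rfl⟩ := hx
    by_cases h1 : ch = 'A' <;> by_cases h2 : ch = 'B' <;> simp [h1, h2]
  have hcA : m.count 'A' = l.count 'A' := by
    rw [hmdef, List.count_eq_countP, List.countP_map, List.count_eq_countP]
    apply List.countP_congr
    intro ch _
    by_cases h1 : ch = 'A' <;> by_cases h2 : ch = 'B' <;> simp [h1, h2, Function.comp]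
  have hcB : m.count 'B' = l.count 'B' := by
    rw [hmdef, List.count_eq_countP, List.countP_map, List.count_eq_countP]
    apply List.countP_congr
    intro ch _
    by_cases h1 : ch = 'A' <;> by_cases h2 : ch = 'B' <;> simp [h1, h2, Function.comp]
  have hcC : (m.count 'C' : Int) = (l.length : Int) - l.count 'A' - l.count 'B' := by
    have hlen : m.length = l.length := by rw [hmdef, List.length_map]
    have hsum := pv_count_sum m hmem
    rw [hcA, hcB] at hsum
    omega
  simp only [pv_foldl_pvStep l 0 0 0, pv_sorted_canon m hmem, pv_runs_canon, hcA, hcB,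
    zero_add]
  have := pv_decision (l.count 'A') (l.count 'B') (m.count 'C')
  rw [hcC] at this
  simpa using this
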